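-- pv_equiv track=rewrite | github.com/NilK-Duy/algorithm-with-python | w3QuickSort/medianQuickSort.py | median_of_three_pivot
-- ===== SOURCE A (Python) =====
-- def median_of_three_pivot(arr):
--     if len(arr) <= 1:
--         return 0, arr
--
--     # Choose three elements: first, middle, and last
--     first, middle, last = arr[0], arr[(len(arr)-1)//2], arr[-1]
--
--     # Find the median element
--     pivot = sorted([first, middle, last])[1]
--
--     # Swap pivot with the first element
--     pivot_index = arr.index(pivot)
--     arr[pivot_index], arr[0] = arr[0], arr[pivot_index]
--
--     # Initialize comparisons with the number of elements minus one
--     comparisons = len(arr) - 1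
--
--     # Initialize the index to track the position to swap
--     swap_index = 1
--
--     # Iterate through the array starting from the second element
--     for i in range(1, len(arr)):
--         if arr[i] < pivot:
--             # Swap current element with the element at swap_index
--             arr[i], arr[swap_index] = arr[swap_index], arr[i]
--             # Move the swap_index to the next position
--             swap_index += 1
--
--     # Swap the pivot with the last element in the lower partition
--     arr[0], arr[swap_index - 1] = arr[swap_index - 1], arr[0]
--
--     # Partition the array into low and high based on the swap_index
--     low = arr[:swap_index - 1]
--     high = arr[swap_index:]
--
--     left_comparisons, left_sorted = median_of_three_pivot(low)
--     right_comparisons, right_sorted = median_of_three_pivot(high)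
--
--     return comparisons + left_comparisons + right_comparisons, left_sorted + [pivot] + right_sorted
-- ===== SOURCE B (Python) =====
-- # Iterative quicksort-comparison counter: an explicit stack of segments replaces A's
-- # recursion; each popped segment gets a median-of-three Lomuto partition, only the
-- # comparison count is accumulated, and the sorted list is produced directly with sorted().
-- # Return-value equivalence only: A mutates its argument in place (one partition pass),
-- # B leaves the caller's list untouched.
--
-- def median_of_three_pivot(arr):
--     if len(arr) <= 1:
--         return 0, arr
--     total = 0
--     stack = [list(arr)]
--     while stack:
--         seg = stack.pop()
--         n = len(seg)
--         if n <= 1: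
--             continue
--         pivot = sorted([seg[0], seg[(n - 1) // 2], seg[-1]])[1]
--         pi = seg.index(pivot)
--         seg[pi], seg[0] = seg[0], seg[pi]
--         swap = 1
--         for i in range(1, n):
--             if seg[i] < pivot:
--                 seg[i], seg[swap] = seg[swap], seg[i]
--                 swap += 1
--         seg[0], seg[swap - 1] = seg[swap - 1], seg[0]
--         total += n - 1
--         stack.append(seg[:swap - 1])
--         stack.append(seg[swap:])
--     return total, sorted(arr)
-- ===== Notes on version B (the rewrite author's own statement) =====
-- stated objective: alternative
-- what changed: A's recursive quicksort (result assembled from recursive calls on slices) is replaced by an iterative explicit-stack worklist that performs the median-of-three Lomuto partition on each popped segment but only accumulates the comparison count, obtaining the sorted list directly as sorted(arr).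
import Mathlib
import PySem

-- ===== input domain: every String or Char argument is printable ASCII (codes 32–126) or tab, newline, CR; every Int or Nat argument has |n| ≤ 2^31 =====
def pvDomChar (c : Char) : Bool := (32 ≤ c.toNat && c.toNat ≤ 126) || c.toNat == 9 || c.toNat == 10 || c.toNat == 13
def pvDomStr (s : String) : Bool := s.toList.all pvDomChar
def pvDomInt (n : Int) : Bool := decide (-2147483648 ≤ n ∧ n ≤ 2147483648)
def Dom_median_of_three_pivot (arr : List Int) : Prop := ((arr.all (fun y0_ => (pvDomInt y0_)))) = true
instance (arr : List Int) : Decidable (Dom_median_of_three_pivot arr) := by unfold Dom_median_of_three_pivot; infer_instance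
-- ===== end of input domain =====

-- B replaces A's recursion by an iterative explicit-stack worklist that only accumulates
-- the comparison count (each popped segment gets one median-of-three Lomuto partition),
-- and obtains the sorted list directly with sorted().  Objective: alternative.
-- Return-value equivalence only: Python A mutates arr in place (one partition pass), B does not.

-- ===== PORT A =====
-- arr[i], arr[j] = arr[j], arr[i]  (exact: every index passed is in range)
def pySwapA (l : List Int) (i j : Int) : List Int :=
  PySem.List.pySetD (PySem.List.pySetD l i (PySem.List.pyGetD l j 0)) j (PySem.List.pyGetD l i 0)

-- body of A's partition for-loop; state = (arr, swap_index)
def partStepA (p : Int) (st : List Int × Int) (i : Int) : List Int × Int :=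
  if PySem.List.pyGetD st.1 i 0 < p then (pySwapA st.1 i st.2, st.2 + 1) else st

-- pivot = sorted([arr[0], arr[(len(arr)-1)//2], arr[-1]])[1]
def pivotA (arr : List Int) : Int :=
  PySem.List.pyGetD
    (PySem.List.sorted
      [PySem.List.pyGetD arr 0 0,
       PySem.List.pyGetD arr (PySem.Int.floordiv (PySem.List.len arr - 1) 2) 0,
       PySem.List.pyGetD arr (-1) 0] (fun x => x) false) 1 0

-- pivot-to-front swap, the partition loop, the final pivot swap: (final array, swap_index)
def partedA (arr : List Int) : List Int × Int :=
  let pivot := pivotA arr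
  let pivotIndex : Int := ((PySem.List.index? arr pivot).getD 0 : Nat)  -- pivot ∈ arr, so index? is some
  let a1 := pySwapA arr pivotIndex 0
  let st := (PySem.List.pyRange 1 (PySem.List.len a1) 1).foldl (partStepA pivot) (a1, 1)
  (pySwapA st.1 0 (st.2 - 1), st.2)

def lowA (arr : List Int) : List Int :=
  PySem.List.slice (partedA arr).1 none (some ((partedA arr).2 - 1))

def highA (arr : List Int) : List Int :=
  PySem.List.slice (partedA arr).1 (some (partedA arr).2) none

-- fuel = arr.length is a pure totality guard (each recursive call strictly shrinks the list)
def medianFuel : Nat → List Int → Int × List Int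
  | 0, arr => (0, arr)
  | n + 1, arr =>
    if arr.length ≤ 1 then (0, arr)
    else
      let pivot := pivotA arr
      let comparisons : Int := PySem.List.len arr - 1
      let L := medianFuel n (lowA arr)
      let R := medianFuel n (highA arr)
      (comparisons + L.1 + R.1, L.2 ++ [pivot] ++ R.2)

def median_of_three_pivot (arr : List Int) : Int × List Int :=
  medianFuel arr.length arr

-- ===== PORT B =====
-- seg[i], seg[j] = seg[j], seg[i]
def pySwapB (l : List Int) (i j : Int) : List Int :=
  PySem.List.pySetD (PySem.List.pySetD l i (PySem.List.pyGetD l j 0)) j (PySem.List.pyGetD l i 0)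

-- pivot = sorted([seg[0], seg[(n-1)//2], seg[-1]])[1]
def pivotB (seg : List Int) : Int :=
  PySem.List.pyGetD
    (PySem.List.sorted
      [PySem.List.pyGetD seg 0 0,
       PySem.List.pyGetD seg (PySem.Int.floordiv (PySem.List.len seg - 1) 2) 0,
       PySem.List.pyGetD seg (-1) 0] (fun x => x) false) 1 0

-- body of B's partition for-loop; state = (seg, swap)
def partStepB (p : Int) (st : List Int × Int) (i : Int) : List Int × Int :=
  if PySem.List.pyGetD st.1 i 0 < p then (pySwapB st.1 i st.2, st.2 + 1) else st

-- one partition pass on a popped segment: (final array, swap)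
def partedB (seg : List Int) : List Int × Int :=
  let pivot := pivotB seg
  let pi : Int := ((PySem.List.index? seg pivot).getD 0 : Nat)  -- pivot ∈ seg, so index? is some
  let s1 := pySwapB seg pi 0
  let st := (PySem.List.pyRange 1 (PySem.List.len s1) 1).foldl (partStepB pivot) (s1, 1)
  (pySwapB st.1 0 (st.2 - 1), st.2)

-- the two segments pushed: seg[:swap-1] and seg[swap:]
def stepB (seg : List Int) : List Int × List Int :=
  (PySem.List.slice (partedB seg).1 none (some ((partedB seg).2 - 1)),
   PySem.List.slice (partedB seg).1 (some (partedB seg).2) none)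

-- while stack: pop a segment, partition, count n-1, push its two parts (head = top of stack);
-- fuel bounds the number of loop iterations (a pure totality guard)
def workGo : Nat → List (List Int) → Int → Int
  | 0, _, total => total
  | _ + 1, [], total => total
  | n + 1, seg :: rest, total =>
    if PySem.List.len seg ≤ 1 then workGo n rest total
    else workGo n ((stepB seg).2 :: (stepB seg).1 :: rest) (total + (PySem.List.len seg - 1))

def median_of_three_pivot_alt (arr : List Int) : Int × List Int :=
  if PySem.List.len arr ≤ 1 then (0, arr)
  else (workGo (2 * arr.length + 1) [arr] 0, PySem.List.sorted arr (fun x => x) false)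

-- ===== PRECONDITION & SPEC =====
def Spec_median_of_three_pivot (arr : List Int) (out : Int × List Int) : Prop := out = median_of_three_pivot_alt arr
instance (arr : List Int) (out : Int × List Int) : Decidable (Spec_median_of_three_pivot arr out) := by unfold Spec_median_of_three_pivot; infer_instance

-- ===== CLAIM (what is proved, stated in full; the proofs are below) =====
def Claim_equal_median_of_three_pivot : Prop := ∀ (arr : List Int), Dom_median_of_three_pivot arr → Spec_median_of_three_pivot arr (median_of_three_pivot arr)

-- ===== LEMMAS AND PROOFS =====
-- length facts about the partition (proof-only)
theorem partFoldA_bounds (p : Int) : ∀ (is : List Int) (l : List Int) (s : Int),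
    ((is.foldl (partStepA p) (l, s)).1.length = l.length) ∧
      s ≤ (is.foldl (partStepA p) (l, s)).2 ∧
      (is.foldl (partStepA p) (l, s)).2 ≤ s + is.length := by
  intro is
  induction is with
  | nil => simp
  | cons i is ih =>
    intro l s
    simp only [List.foldl_cons, partStepA]
    split_ifs with hx
    · obtain ⟨h1, h2, h3⟩ := ih (pySwapA l i s) (s + 1)
      refine ⟨?_, by omega, ?_⟩
      · rw [h1]; simp [pySwapA, PySem.List.length_pySetD]
      · simp only [List.length_cons] at *; push_cast at h3 ⊢; omega
    · obtain ⟨h1, h2, h3⟩ := ih l s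
      exact ⟨h1, by omega, by simp only [List.length_cons] at *; push_cast at h3 ⊢; omega⟩

theorem pySwapA_length (l : List Int) (i j : Int) : (pySwapA l i j).length = l.length := by
  simp [pySwapA, PySem.List.length_pySetD]

theorem partedA_facts (arr : List Int) (h2 : 2 ≤ arr.length) :
    (partedA arr).1.length = arr.length ∧ 1 ≤ (partedA arr).2 ∧ (partedA arr).2 ≤ (arr.length : Int) := by
  simp only [partedA]
  set p := pivotA arr with hp
  set a1 := pySwapA arr (((PySem.List.index? arr p).getD 0 : Nat) : Int) 0 with ha1
  set st := (PySem.List.pyRange 1 (PySem.List.len a1) 1).foldl (partStepA p) (a1, 1) with hst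
  have hlen1 : a1.length = arr.length := by rw [ha1]; exact pySwapA_length _ _ _
  obtain ⟨b1, b2, b3⟩ := partFoldA_bounds p (PySem.List.pyRange 1 (PySem.List.len a1) 1) a1 1
  rw [← hst] at b1 b2 b3
  have hrange : (PySem.List.pyRange 1 (PySem.List.len a1) 1).length = arr.length - 1 := by
    simp [PySem.List.length_pyRange_one, hlen1]
  rw [hrange] at b3
  refine ⟨by rw [pySwapA_length, b1, hlen1], b2, ?_⟩
  omega

theorem lowA_length_lt (arr : List Int) (h : ¬ arr.length ≤ 1) : (lowA arr).length < arr.length := by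
  have h2 : 2 ≤ arr.length := by omega
  obtain ⟨f1, f2, f3⟩ := partedA_facts arr h2
  unfold lowA
  rw [PySem.List.slice_to _ (by omega : (0:Int) ≤ (partedA arr).2 - 1)]
  simp only [List.length_take, f1]
  omega

theorem highA_length_lt (arr : List Int) (h : ¬ arr.length ≤ 1) : (highA arr).length < arr.length := by
  have h2 : 2 ≤ arr.length := by omega
  obtain ⟨f1, f2, f3⟩ := partedA_facts arr h2
  unfold highA
  rw [PySem.List.slice_from _ (by omega : (0:Int) ≤ (partedA arr).2)]
  simp only [List.length_drop, f1]
  omega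


theorem stepB_length (seg : List Int) (h : ¬ seg.length ≤ 1) :
    (stepB seg).1.length + (stepB seg).2.length + 1 = seg.length := by
  have he : stepB seg = (lowA seg, highA seg) := rfl
  have h2 : 2 ≤ seg.length := by omega
  obtain ⟨f1, f2, f3⟩ := partedA_facts seg h2
  rw [he]
  simp only [lowA, highA]
  rw [PySem.List.slice_to _ (by omega : (0:Int) ≤ (partedA seg).2 - 1),
    PySem.List.slice_from _ (by omega : (0:Int) ≤ (partedA seg).2)]
  simp only [List.length_take, List.length_drop, f1]
  omega

-- the fuel parameter is irrelevant once it covers the list's length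
theorem medianFuel_congr : ∀ (n m : Nat) (arr : List Int), arr.length ≤ n → arr.length ≤ m →
    medianFuel n arr = medianFuel m arr := by
  intro n
  induction n with
  | zero =>
    intro m arr hn _
    have : arr = [] := List.eq_nil_of_length_eq_zero (by omega)
    subst this
    cases m <;> simp [medianFuel]
  | succ n ih =>
    intro m arr hn hm
    cases m with
    | zero =>
      have : arr = [] := List.eq_nil_of_length_eq_zero (by omega)
      subst this
      simp [medianFuel]
    | succ m =>
      simp only [medianFuel]
      by_cases hle : arr.length ≤ 1
      · rw [if_pos hle, if_pos hle]
      · rw [if_neg hle, if_neg hle]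
        have hlow := lowA_length_lt arr hle
        have hhigh := highA_length_lt arr hle
        rw [ih m (lowA arr) (by omega) (by omega), ih m (highA arr) (by omega) (by omega)]

theorem median_base (arr : List Int) (h : arr.length ≤ 1) :
    median_of_three_pivot arr = (0, arr) := by
  unfold median_of_three_pivot
  interval_cases h' : arr.length <;> simp [medianFuel, h']

theorem median_rec (seg : List Int) (h2 : ¬ seg.length ≤ 1) :
    median_of_three_pivot seg
      = ((PySem.List.len seg - 1) + (median_of_three_pivot (lowA seg)).1
            + (median_of_three_pivot (highA seg)).1,
         (median_of_three_pivot (lowA seg)).2 ++ [pivotA seg]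
            ++ (median_of_three_pivot (highA seg)).2) := by
  unfold median_of_three_pivot
  obtain ⟨k, hk⟩ : ∃ k, seg.length = k + 1 := ⟨seg.length - 1, by omega⟩
  have hlow := lowA_length_lt seg h2
  have hhigh := highA_length_lt seg h2
  rw [hk]
  simp only [medianFuel]
  rw [if_neg (by omega : ¬ seg.length ≤ 1)]
  rw [medianFuel_congr k (lowA seg).length (lowA seg) (by omega) le_rfl,
    medianFuel_congr k (highA seg).length (highA seg) (by omega) le_rfl]

-- B's pushed segments are exactly A's recursive arguments (the two partitions share code)
theorem stepB_eq (seg : List Int) : stepB seg = (lowA seg, highA seg) := rfl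

-- proof-only model of the partition: rest = the segment after the pivot-to-front swap,
-- folded into a (lows, queue) pair; used to establish permutation and bound facts.
def restB (seg : List Int) : List Int :=
  let pi : Int := ((PySem.List.index? seg (pivotB seg)).getD 0 : Nat)
  (PySem.List.pyRange 1 (PySem.List.len seg) 1).map
    (fun j => if j = pi then PySem.List.pyGetD seg 0 0 else PySem.List.pyGetD seg j 0)

-- a low element appends to lows and rotates the queue; others append to the queue
def lqStep (p : Int) (st : List Int × List Int) (x : Int) : List Int × List Int :=
  if x < p then
    (st.1 ++ [x], match st.2 with | [] => [] | q0 :: qt => qt ++ [q0])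
  else (st.1, st.2 ++ [x])

-- the two partitions as the (lows, queue) fold predicts them (lows rotated by the final swap)
def specParts (seg : List Int) : List Int × List Int :=
  let st := (restB seg).foldl (lqStep (pivotB seg)) ([], [])
  (PySem.List.slice st.1 (some (-1)) none ++ PySem.List.slice st.1 none (some (-1)), st.2)

-- list surgery at the length of a prefix
theorem getD_pre (pre suf : List Int) (x d : Int) : (pre ++ x :: suf).getD pre.length d = x := by
  simp [List.getD]

theorem set_pre (pre suf : List Int) (x v : Int) : (pre ++ x :: suf).set pre.length v = pre ++ v :: suf := by
  simp

-- a swap of an index with itself is the identity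
theorem pySwapA_cancel (pre suf : List Int) (x : Int) :
    pySwapA (pre ++ x :: suf) ((pre.length : Nat) : Int) ((pre.length : Nat) : Int) = pre ++ x :: suf := by
  simp only [pySwapA, PySem.List.pySetD_natCast, PySem.List.pyGetD_natCast, getD_pre, set_pre]

-- the real swap: exchange the elements at pre.length and (pre ++ y :: mid).length
theorem pySwapA_swap (pre mid suf : List Int) (y x : Int) :
    pySwapA (pre ++ y :: (mid ++ x :: suf)) (((pre ++ y :: mid).length : Nat) : Int) ((pre.length : Nat) : Int)
      = pre ++ x :: (mid ++ y :: suf) := by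
  have h1 : pre ++ y :: (mid ++ x :: suf) = (pre ++ y :: mid) ++ x :: suf := by simp
  have g1 : (pre ++ y :: (mid ++ x :: suf)).getD pre.length 0 = y := getD_pre _ _ _ _
  have g2 : (pre ++ y :: (mid ++ x :: suf)).getD (pre ++ y :: mid).length 0 = x := by
    rw [h1]; exact getD_pre _ _ _ _
  have s1 : (pre ++ y :: (mid ++ x :: suf)).set (pre ++ y :: mid).length y = pre ++ y :: (mid ++ y :: suf) := by
    rw [h1, set_pre]; simp
  have s2 : (pre ++ y :: (mid ++ y :: suf)).set pre.length x = pre ++ x :: (mid ++ y :: suf) := set_pre _ _ _ _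
  simp only [pySwapA, PySem.List.pySetD_natCast, PySem.List.pyGetD_natCast, g1, g2, s1, s2]

-- the same swap with the indices given in the other order
theorem pySwapA_swap' (pre mid suf : List Int) (y x : Int) :
    pySwapA (pre ++ y :: (mid ++ x :: suf)) ((pre.length : Nat) : Int) (((pre ++ y :: mid).length : Nat) : Int)
      = pre ++ x :: (mid ++ y :: suf) := by
  have h1 : pre ++ y :: (mid ++ x :: suf) = (pre ++ y :: mid) ++ x :: suf := by simp
  have g1 : (pre ++ y :: (mid ++ x :: suf)).getD pre.length 0 = y := getD_pre _ _ _ _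
  have g2 : (pre ++ y :: (mid ++ x :: suf)).getD (pre ++ y :: mid).length 0 = x := by
    rw [h1]; exact getD_pre _ _ _ _
  have s1 : (pre ++ y :: (mid ++ x :: suf)).set pre.length x = pre ++ x :: (mid ++ x :: suf) := set_pre _ _ _ _
  have s2 : (pre ++ x :: (mid ++ x :: suf)).set (pre ++ y :: mid).length y = pre ++ x :: (mid ++ y :: suf) := by
    have h2 : pre ++ x :: (mid ++ x :: suf) = (pre ++ x :: mid) ++ x :: suf := by simp
    have h3 : (pre ++ y :: mid).length = (pre ++ x :: mid).length := by simp
    rw [h2, h3, set_pre]; simp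
  simp only [pySwapA, PySem.List.pySetD_natCast, PySem.List.pyGetD_natCast, g1, g2, s1, s2]

-- one step of A's partition loop, on the structured state
theorem partStepA_eval (p x : Int) (lows q xs' : List Int) :
    partStepA p (p :: (lows ++ (q ++ (x :: xs'))), 1 + (lows.length : Int))
        ((1 + lows.length + q.length : Nat) : Int)
    = if x < p then
        (p :: ((lows ++ [x]) ++ ((match q with | [] => [] | q0 :: qt => qt ++ [q0]) ++ xs')),
          1 + ((lows ++ [x]).length : Int))
      else (p :: (lows ++ ((q ++ [x]) ++ xs')), 1 + (lows.length : Int)) := by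
  have hl : p :: (lows ++ (q ++ (x :: xs'))) = (p :: (lows ++ q)) ++ x :: xs' := by simp
  have hget : PySem.List.pyGetD (p :: (lows ++ (q ++ (x :: xs')))) ((1 + lows.length + q.length : Nat) : Int) 0 = x := by
    rw [hl, PySem.List.pyGetD_natCast]
    have : 1 + lows.length + q.length = (p :: (lows ++ q)).length := by simp; omega
    rw [this]; exact getD_pre _ _ _ _
  unfold partStepA
  simp only [hget]
  split_ifs with hx
  · cases q with
    | nil =>
      have hi : ((1 + lows.length + ([] : List Int).length : Nat) : Int) = (((p :: lows).length : Nat) : Int) := by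
        push_cast [List.length_cons, List.length_nil, List.length_append]; omega
      have hj : (1 : Int) + (lows.length : Int) = (((p :: lows).length : Nat) : Int) := by
        push_cast [List.length_cons, List.length_nil, List.length_append]; omega
      have hll : p :: (lows ++ (([] : List Int) ++ (x :: xs'))) = (p :: lows) ++ x :: xs' := by simp
      rw [hi, hj, hll, pySwapA_cancel]
      simp only [Prod.mk.injEq]
      exact ⟨by simp, by push_cast [List.length_cons, List.length_nil, List.length_append]; omega⟩
    | cons q0 qt =>
      have hll : p :: (lows ++ ((q0 :: qt) ++ (x :: xs'))) = (p :: lows) ++ q0 :: (qt ++ x :: xs') := by simp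
      have hi : ((1 + lows.length + (q0 :: qt).length : Nat) : Int) = ((((p :: lows) ++ q0 :: qt).length : Nat) : Int) := by
        push_cast [List.length_cons, List.length_nil, List.length_append]; omega
      have hj : (1 : Int) + (lows.length : Int) = (((p :: lows).length : Nat) : Int) := by
        push_cast [List.length_cons, List.length_nil, List.length_append]; omega
      rw [hll, hi, hj, pySwapA_swap]
      simp only [Prod.mk.injEq]
      exact ⟨by simp, by push_cast [List.length_cons, List.length_nil, List.length_append]; omega⟩
  · simp [List.append_assoc]

-- the heart: A's swap-based partition fold equals the (lows, queue) fold
theorem bridge_fold (p : Int) : ∀ (xs lows q : List Int),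
    (PySem.List.pyRange ((1 + lows.length + q.length : Nat) : Int)
        ((1 + lows.length + q.length + xs.length : Nat) : Int) 1).foldl
      (partStepA p) (p :: (lows ++ (q ++ xs)), 1 + (lows.length : Int))
    = (p :: ((xs.foldl (lqStep p) (lows, q)).1 ++ (xs.foldl (lqStep p) (lows, q)).2),
        1 + ((xs.foldl (lqStep p) (lows, q)).1.length : Int)) := by
  intro xs
  induction xs with
  | nil =>
    intro lows q
    rw [PySem.List.pyRange_one_eq_nil (by push_cast [List.length_nil]; omega)]
    simp
  | cons x xs ih =>
    intro lows q
    have hab : ((1 + lows.length + q.length : Nat) : Int) < ((1 + lows.length + q.length + (x :: xs).length : Nat) : Int) := by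
      push_cast [List.length_cons]; omega
    rw [PySem.List.pyRange_one_cons hab, List.foldl_cons, partStepA_eval]
    simp only [List.foldl_cons, lqStep]
    by_cases hx : x < p
    · cases q with
      | nil =>
        simp only [if_pos hx]
        have e1 : ((1 + lows.length + ([] : List Int).length : Nat) : Int) + 1
            = ((1 + (lows ++ [x]).length + ([] : List Int).length : Nat) : Int) := by
          push_cast [List.length_cons, List.length_nil, List.length_append]; omega
        have e2 : ((1 + lows.length + ([] : List Int).length + (x :: xs).length : Nat) : Int)
            = ((1 + (lows ++ [x]).length + ([] : List Int).length + xs.length : Nat) : Int) := by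
          push_cast [List.length_cons, List.length_nil, List.length_append]; omega
        rw [e1, e2]
        exact ih (lows ++ [x]) []
      | cons q0 qt =>
        simp only [if_pos hx]
        have e1 : ((1 + lows.length + (q0 :: qt).length : Nat) : Int) + 1
            = ((1 + (lows ++ [x]).length + (qt ++ [q0]).length : Nat) : Int) := by
          push_cast [List.length_cons, List.length_nil, List.length_append]; omega
        have e2 : ((1 + lows.length + (q0 :: qt).length + (x :: xs).length : Nat) : Int)
            = ((1 + (lows ++ [x]).length + (qt ++ [q0]).length + xs.length : Nat) : Int) := by
          push_cast [List.length_cons, List.length_nil, List.length_append]; omega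
        rw [e1, e2]
        exact ih (lows ++ [x]) (qt ++ [q0])
    · simp only [if_neg hx]
      have e1 : ((1 + lows.length + q.length : Nat) : Int) + 1
          = ((1 + lows.length + (q ++ [x]).length : Nat) : Int) := by
        push_cast [List.length_cons, List.length_nil, List.length_append]; omega
      have e2 : ((1 + lows.length + q.length + (x :: xs).length : Nat) : Int)
          = ((1 + lows.length + (q ++ [x]).length + xs.length : Nat) : Int) := by
        push_cast [List.length_cons, List.length_nil, List.length_append]; omega
      rw [e1, e2]
      exact ih lows (q ++ [x])

theorem pivotA_eq_pivotB (arr : List Int) : pivotA arr = pivotB arr := rfl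

theorem pivotA_mem (arr : List Int) (h : 2 ≤ arr.length) : pivotA arr ∈ arr := by
  have hm : pivotA arr ∈ [PySem.List.pyGetD arr 0 0,
      PySem.List.pyGetD arr (PySem.Int.floordiv (PySem.List.len arr - 1) 2) 0,
      PySem.List.pyGetD arr (-1) 0] := by
    rw [← PySem.List.mem_sorted _ (fun x => (x:Int)) false]
    apply PySem.List.pyGetD_mem
    constructor <;> simp [PySem.List.length_sorted]
  have hfd := PySem.Int.floordiv_two_mid_bounds (by omega : (0:Int) ≤ (arr.length : Int) - 1)
  simp only [zero_add] at hfd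
  simp only [List.mem_cons, List.not_mem_nil, or_false] at hm
  rcases hm with hm | hm | hm <;> rw [hm] <;> apply PySem.List.pyGetD_mem <;>
    simp only [PySem.Raise.InRange, PySem.List.len_eq] <;> omega

-- restB written as tail-with-one-replacement
theorem restB_spec (arr : List Int) (h2 : 2 ≤ arr.length) (k : Nat) (hklt : k < arr.length)
    (hk : PySem.List.index? arr (pivotB arr) = some k) :
    restB arr = (if k = 0 then arr.tail else arr.tail.set (k-1) (arr.getD 0 0)) := by
  have hlen : (restB arr).length = arr.length - 1 := by
    simp [restB, PySem.List.length_pyRange_one]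
  have hmap : ∀ (t : Nat) (ht : t < (restB arr).length), (restB arr)[t] =
      (if ((1 : Int) + (t : Int)) = ((k : Nat) : Int) then PySem.List.pyGetD arr 0 0
        else PySem.List.pyGetD arr ((1 : Int) + (t : Int)) 0) := by
    intro t ht
    simp only [restB, hk, Option.getD_some]
    rw [List.getElem_map, PySem.List.getElem_pyRange_one]
  have hg0 : PySem.List.pyGetD arr 0 0 = arr.getD 0 0 := by
    have : ((0:Nat):Int) = (0:Int) := by norm_num
    rw [← this, PySem.List.pyGetD_natCast]
  have hgt : ∀ (t : Nat), t < arr.length - 1 →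
      PySem.List.pyGetD arr ((1 : Int) + (t : Int)) 0 = arr.getD (1+t) 0 := by
    intro t ht
    have : ((1:Int) + (t:Int)) = (((1 + t : Nat)) : Int) := by push_cast; ring
    rw [this, PySem.List.pyGetD_natCast]
  by_cases hk0 : k = 0
  · subst hk0
    rw [if_pos rfl]
    apply List.ext_getElem
    · rw [hlen]; simp [List.length_tail]
    · intro t ht1 ht2
      have ht1' : t < arr.length - 1 := by rw [hlen] at ht1; exact ht1
      rw [hmap t ht1, if_neg (by push_cast; omega), hgt t ht1', List.getElem_tail,
        List.getD_eq_getElem _ _ (by omega)]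
      congr 1
      omega
  · rw [if_neg hk0]
    apply List.ext_getElem
    · rw [hlen]; simp [List.length_tail]
    · intro t ht1 ht2
      have ht1' : t < arr.length - 1 := by rw [hlen] at ht1; exact ht1
      rw [hmap t ht1, List.getElem_set]
      by_cases he : 1 + t = k
      · rw [if_pos (by omega), if_pos (by omega), hg0]
      · rw [if_neg (by omega), if_neg (by omega), hgt t ht1', List.getElem_tail,
          List.getD_eq_getElem _ _ (by omega)]
        congr 1
        omega

-- A's pivot-to-front swap produces exactly p :: restB arr
theorem a1_eq_restB (arr : List Int) (h : 2 ≤ arr.length) :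
    pySwapA arr ((PySem.List.index? arr (pivotA arr)).getD 0 : Nat) 0
      = pivotA arr :: restB arr := by
  have hmem : pivotA arr ∈ arr := pivotA_mem arr h
  obtain ⟨k, hk⟩ := Option.isSome_iff_exists.mp ((PySem.List.index?_isSome_iff arr (pivotA arr)).mpr hmem)
  obtain ⟨hklt, hkval, _⟩ := PySem.List.getElem_of_index?_eq_some hk
  have hkB : PySem.List.index? arr (pivotB arr) = some k := by rw [← pivotA_eq_pivotB]; exact hk
  rw [hk, Option.getD_some]
  rcases Nat.eq_zero_or_pos k with hk0 | hkpos
  · subst hk0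
    have harr : arr = arr[0] :: arr.tail := by
      cases arr with
      | nil => simp at hklt
      | cons a l => simp
    have hcancel := pySwapA_cancel [] arr.tail arr[0]
    simp only [List.nil_append, List.length_nil] at hcancel
    rw [restB_spec arr h 0 hklt hkB, if_pos rfl]
    calc pySwapA arr ((0:Nat):Int) ((0:Nat):Int) = pySwapA (arr[0] :: arr.tail) ((0:Nat):Int) ((0:Nat):Int) := by rw [← harr]
      _ = arr[0] :: arr.tail := by exact_mod_cast hcancel
      _ = pivotA arr :: arr.tail := by rw [hkval]
  · obtain ⟨m, rfl⟩ : ∃ m, k = m + 1 := ⟨k - 1, by omega⟩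
    have hmlt : m < arr.tail.length := by simp [List.length_tail]; omega
    have h0len : 0 < arr.length := by omega
    have hhead : arr = arr[0] :: arr.tail := by
      cases arr with
      | nil => simp at hklt
      | cons a l => simp
    have htail : arr.tail = arr.tail.take m ++ pivotA arr :: arr.tail.drop (m+1) := by
      have h2' : arr.tail = arr.tail.take m ++ arr.tail[m] :: arr.tail.drop (m+1) := by
        conv_lhs => rw [← List.take_append_drop m arr.tail]
        rw [List.drop_eq_getElem_cons hmlt]
      have h3 : arr.tail[m] = pivotA arr := by
        rw [← hkval, List.getElem_tail]
      rw [← h3, ← h2']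
    have harr : arr = arr[0] :: (arr.tail.take m ++ pivotA arr :: arr.tail.drop (m+1)) := by
      conv_lhs => rw [hhead, htail]
    have hmidlen : (arr[0] :: arr.tail.take m).length = m + 1 := by
      simp [List.length_take]; omega
    have hswap := pySwapA_swap [] (arr.tail.take m) (arr.tail.drop (m+1)) arr[0] (pivotA arr)
    simp only [List.nil_append, List.length_nil] at hswap
    rw [restB_spec arr h (m+1) hklt hkB, if_neg (by omega)]
    simp only [Nat.add_sub_cancel]
    have hkcast : (((m + 1 : Nat)) : Int) = (((arr[0] :: arr.tail.take m).length : Nat) : Int) := by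
      rw [hmidlen]
    have hgoalL : pySwapA arr (((m+1 : Nat)) : Int) 0
        = pivotA arr :: (arr.tail.take m ++ arr[0] :: arr.tail.drop (m+1)) := by
      conv_lhs => rw [harr]
      rw [hkcast]
      have h0 : (0 : Int) = ((0:Nat) : Int) := by norm_num
      rw [h0]
      exact hswap
    rw [hgoalL]
    congr 1
    have hset := set_pre (arr.tail.take m) (arr.tail.drop (m+1)) (pivotA arr) arr[0]
    rw [show (arr.tail.take m).length = m from by simp [List.length_take]; omega] at hset
    rw [show arr.getD 0 0 = arr[0] from List.getD_eq_getElem _ _ h0len]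
    rw [← hset, ← htail]

-- partedA expressed through the (lows, queue) fold
theorem partedA_eq (arr : List Int) (h : 2 ≤ arr.length) :
    partedA arr
      = (pySwapA (pivotA arr ::
            (((restB arr).foldl (lqStep (pivotA arr)) ([], [])).1 ++
             ((restB arr).foldl (lqStep (pivotA arr)) ([], [])).2)) 0
          ((((restB arr).foldl (lqStep (pivotA arr)) ([], [])).1.length : Int)),
         1 + (((restB arr).foldl (lqStep (pivotA arr)) ([], [])).1.length : Int)) := by
  simp only [partedA]
  rw [a1_eq_restB arr h]
  have hb := bridge_fold (pivotA arr) (restB arr) [] []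
  simp only [List.length_nil, List.nil_append, Nat.cast_zero, add_zero] at hb
  have e1 : ((1 + (0:Nat) + (0:Nat) : Nat) : Int) = (1 : Int) := by norm_num
  have e2 : ((1 + (0:Nat) + (0:Nat) + (restB arr).length : Nat) : Int)
      = PySem.List.len (pivotA arr :: restB arr) := by
    simp only [PySem.List.len_eq, List.length_cons]; push_cast; omega
  rw [e1, e2] at hb
  rw [hb]
  simp only [Prod.mk.injEq]
  exact ⟨by congr 1; ring, trivial⟩

theorem lowA_eq_spec (arr : List Int) (h : 2 ≤ arr.length) : lowA arr = (specParts arr).1 := by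
  unfold lowA specParts
  rw [partedA_eq arr h, ← pivotA_eq_pivotB]
  dsimp only
  have he : (1 + (((restB arr).foldl (lqStep (pivotA arr)) ([], [])).1.length : Int) - 1)
      = ((((restB arr).foldl (lqStep (pivotA arr)) ([], [])).1.length : Int)) := by ring
  rw [he]
  rcases List.eq_nil_or_concat ((restB arr).foldl (lqStep (pivotA arr)) ([], [])).1 with hnil | ⟨l', z, hcat⟩
  · rw [hnil]
    rw [PySem.List.slice_to _ (by norm_num), PySem.List.slice_from_neg_one, PySem.List.slice_to_neg_one]
    simp
  · rw [List.concat_eq_append] at hcat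
    rw [hcat]
    rw [PySem.List.slice_to _ (by positivity), PySem.List.slice_from_neg_one, PySem.List.slice_to_neg_one]
    have hswap := pySwapA_swap' [] l' ((restB arr).foldl (lqStep (pivotA arr)) ([], [])).2 (pivotA arr) z
    simp only [List.nil_append, List.length_nil, List.length_cons] at hswap
    have hassoc : (l' ++ [z]) ++ ((restB arr).foldl (lqStep (pivotA arr)) ([], [])).2
        = l' ++ z :: ((restB arr).foldl (lqStep (pivotA arr)) ([], [])).2 := by simp
    have h0 : (0 : Int) = ((0:Nat) : Int) := by norm_num
    rw [hassoc, h0]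
    rw [show (((l' ++ [z]).length : Nat) : Int) = (((pivotA arr :: l').length : Nat) : Int) from by
      push_cast [List.length_cons, List.length_append, List.length_nil]; omega]
    rw [show (((pivotA arr :: l').length : Nat) : Int) = (((l'.length + 1 : Nat)) : Int) from by
      push_cast [List.length_cons]; omega] at *
    rw [hswap]
    simp

theorem highA_eq_spec (arr : List Int) (h : 2 ≤ arr.length) : highA arr = (specParts arr).2 := by
  unfold highA specParts
  rw [partedA_eq arr h, ← pivotA_eq_pivotB]
  dsimp only
  rcases List.eq_nil_or_concat ((restB arr).foldl (lqStep (pivotA arr)) ([], [])).1 with hnil | ⟨l', z, hcat⟩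
  · rw [hnil]
    rw [PySem.List.slice_from _ (by norm_num)]
    have hc := pySwapA_cancel [] ((restB arr).foldl (lqStep (pivotA arr)) ([], [])).2 (pivotA arr)
    simp only [List.nil_append, List.length_nil] at hc
    have h0 : (0 : Int) = ((0:Nat) : Int) := by norm_num
    simp only [List.length_nil, Nat.cast_zero, add_zero, List.nil_append]
    rw [h0, hc]
    simp
  · rw [List.concat_eq_append] at hcat
    rw [hcat]
    rw [PySem.List.slice_from _ (by positivity)]
    have hswap := pySwapA_swap' [] l' ((restB arr).foldl (lqStep (pivotA arr)) ([], [])).2 (pivotA arr) z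
    simp only [List.nil_append, List.length_nil, List.length_cons] at hswap
    have hassoc : (l' ++ [z]) ++ ((restB arr).foldl (lqStep (pivotA arr)) ([], [])).2
        = l' ++ z :: ((restB arr).foldl (lqStep (pivotA arr)) ([], [])).2 := by simp
    have h0 : (0 : Int) = ((0:Nat) : Int) := by norm_num
    rw [hassoc, h0]
    rw [show (((l' ++ [z]).length : Nat) : Int) = (((l'.length + 1 : Nat)) : Int) from by
      push_cast [List.length_cons, List.length_append, List.length_nil]; omega]
    rw [hswap]
    have hlen : ((1 : Int) + (((l'.length + 1 : Nat)) : Int)).toNat = (z :: (l' ++ [pivotA arr])).length := by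
      simp [List.length_append, List.length_cons]; omega
    have hsplit : z :: (l' ++ pivotA arr :: ((restB arr).foldl (lqStep (pivotA arr)) ([], [])).2)
        = (z :: (l' ++ [pivotA arr])) ++ ((restB arr).foldl (lqStep (pivotA arr)) ([], [])).2 := by simp
    rw [hsplit, hlen, List.drop_left]

-- the queue rotation is a permutation
theorem rot_perm (q : List Int) :
    (match q with | ([] : List Int) => ([] : List Int) | q0 :: qt => qt ++ [q0]).Perm q := by
  cases q with
  | nil => exact List.Perm.refl _
  | cons q0 qt => exact List.perm_append_singleton q0 qt

-- the (lows, queue) fold only rearranges its input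
theorem lqFold_perm (p : Int) : ∀ (xs l q : List Int),
    ((xs.foldl (lqStep p) (l, q)).1 ++ (xs.foldl (lqStep p) (l, q)).2).Perm ((l ++ q) ++ xs) := by
  intro xs
  induction xs with
  | nil => intro l q; simp
  | cons x xs ih =>
    intro l q
    simp only [List.foldl_cons, lqStep]
    split_ifs with hx
    · refine (ih (l ++ [x]) _).trans ?_
      simp only [List.append_assoc]
      refine List.Perm.append_left l ?_
      refine List.Perm.trans ?_ (List.perm_middle.symm)
      exact List.Perm.cons x (List.Perm.append_right xs (rot_perm q))
    · refine (ih l (q ++ [x])).trans ?_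
      simp [List.append_assoc]

-- the fold keeps lows below the pivot and the queue at or above it
theorem lqFold_bounds (p : Int) : ∀ (xs l q : List Int),
    (∀ y ∈ l, y < p) → (∀ y ∈ q, p ≤ y) →
    (∀ y ∈ (xs.foldl (lqStep p) (l, q)).1, y < p) ∧ (∀ y ∈ (xs.foldl (lqStep p) (l, q)).2, p ≤ y) := by
  intro xs
  induction xs with
  | nil => intro l q hl hq; exact ⟨hl, hq⟩
  | cons x xs ih =>
    intro l q hl hq
    simp only [List.foldl_cons, lqStep]
    split_ifs with hx
    · refine ih _ _ ?_ ?_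
      · intro y hy
        rcases List.mem_append.mp hy with hy | hy
        · exact hl y hy
        · simp only [List.mem_singleton] at hy; subst hy; exact hx
      · intro y hy
        apply hq
        exact (rot_perm q).mem_iff.mp hy
    · refine ih _ _ hl ?_
      intro y hy
      rcases List.mem_append.mp hy with hy | hy
      · exact hq y hy
      · simp only [List.mem_singleton] at hy; subst hy; omega

-- the low side is a rotation of the fold's low list
theorem specParts_fst_perm (arr : List Int) :
    (specParts arr).1.Perm ((restB arr).foldl (lqStep (pivotB arr)) ([], [])).1 := by
  unfold specParts
  dsimp only
  rw [PySem.List.slice_from_neg_one, PySem.List.slice_to_neg_one]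
  refine (List.perm_append_comm).trans ?_
  rw [List.dropLast_eq_take]
  conv_rhs => rw [← List.take_append_drop (((restB arr).foldl (lqStep (pivotB arr)) ([], [])).1.length - 1) ((restB arr).foldl (lqStep (pivotB arr)) ([], [])).1]

-- restB together with the pivot is a rearrangement of the segment
theorem restB_perm (arr : List Int) (h : 2 ≤ arr.length) :
    (pivotA arr :: restB arr).Perm arr := by
  have hmem : pivotA arr ∈ arr := pivotA_mem arr h
  obtain ⟨k, hk⟩ := Option.isSome_iff_exists.mp ((PySem.List.index?_isSome_iff arr (pivotA arr)).mpr hmem)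
  obtain ⟨hklt, hkval, _⟩ := PySem.List.getElem_of_index?_eq_some hk
  have hkB : PySem.List.index? arr (pivotB arr) = some k := by rw [← pivotA_eq_pivotB]; exact hk
  have h0len : 0 < arr.length := by omega
  have hhead : arr = arr[0] :: arr.tail := by
    cases arr with
    | nil => simp at hklt
    | cons a l => simp
  rcases Nat.eq_zero_or_pos k with hk0 | hkpos
  · subst hk0
    rw [restB_spec arr h 0 hklt hkB, if_pos rfl]
    conv_rhs => rw [hhead]
    rw [← hkval]
  · obtain ⟨m, rfl⟩ : ∃ m, k = m + 1 := ⟨k - 1, by omega⟩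
    have hmlt : m < arr.tail.length := by simp [List.length_tail]; omega
    have htail : arr.tail = arr.tail.take m ++ pivotA arr :: arr.tail.drop (m+1) := by
      have h2' : arr.tail = arr.tail.take m ++ arr.tail[m] :: arr.tail.drop (m+1) := by
        conv_lhs => rw [← List.take_append_drop m arr.tail]
        rw [List.drop_eq_getElem_cons hmlt]
      have h3 : arr.tail[m] = pivotA arr := by rw [← hkval, List.getElem_tail]
      rw [← h3, ← h2']
    rw [restB_spec arr h (m+1) hklt hkB, if_neg (by omega)]
    simp only [Nat.add_sub_cancel]
    rw [show arr.getD 0 0 = arr[0] from List.getD_eq_getElem _ _ h0len]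
    have hset : arr.tail.set m arr[0] = arr.tail.take m ++ arr[0] :: arr.tail.drop (m+1) := by
      have hs := set_pre (arr.tail.take m) (arr.tail.drop (m+1)) (pivotA arr) arr[0]
      rw [show (arr.tail.take m).length = m from by simp [List.length_take]; omega] at hs
      rw [← hs, ← htail]
    rw [hset]
    conv_rhs => rw [hhead, htail]
    refine List.Perm.trans (List.Perm.cons _ List.perm_middle) ?_
    refine List.Perm.trans (List.Perm.swap _ _ _) ?_
    exact List.Perm.cons _ List.perm_middle.symm

theorem specParts_perm (arr : List Int) (h : 2 ≤ arr.length) :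
    ((specParts arr).1 ++ pivotA arr :: (specParts arr).2).Perm arr := by
  have h2 : (specParts arr).2 = ((restB arr).foldl (lqStep (pivotB arr)) ([], [])).2 := rfl
  refine List.Perm.trans List.perm_middle ?_
  refine List.Perm.trans (List.Perm.cons _ (List.Perm.append_right _ (specParts_fst_perm arr))) ?_
  rw [h2, ← pivotA_eq_pivotB]
  refine List.Perm.trans (List.Perm.cons _ ?_) (restB_perm arr h)
  refine List.Perm.trans (lqFold_perm (pivotA arr) (restB arr) [] []) ?_
  simp

theorem specParts_bounds (arr : List Int) (h : 2 ≤ arr.length) :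
    (∀ x ∈ (specParts arr).1, x < pivotA arr) ∧ (∀ x ∈ (specParts arr).2, pivotA arr ≤ x) := by
  obtain ⟨hl, hq⟩ := lqFold_bounds (pivotB arr) (restB arr) [] [] (by simp) (by simp)
  rw [pivotA_eq_pivotB]
  constructor
  · intro x hx
    exact hl x ((specParts_fst_perm arr).mem_iff.mp hx)
  · intro x hx
    exact hq x hx

-- quicksort correctness: A's list output is a sorted permutation of its input
theorem resultA_perm_sorted_fuel : ∀ (n : Nat) (arr : List Int), arr.length ≤ n →
    (median_of_three_pivot arr).2.Perm arr ∧
      (median_of_three_pivot arr).2.Pairwise (· ≤ ·) := by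
  intro n
  induction n with
  | zero =>
    intro arr hlen
    have : arr = [] := List.eq_nil_of_length_eq_zero (by omega)
    subst this
    rw [median_base [] (by simp)]
    simp
  | succ n ih =>
    intro arr hlen
    by_cases hle : arr.length ≤ 1
    · rw [median_base arr hle]
      rcases arr with _ | ⟨a, _ | ⟨b, t⟩⟩
      · simp
      · simp
      · simp at hle
    · have h2 : 2 ≤ arr.length := by omega
      have hlow := lowA_length_lt arr hle
      have hhigh := highA_length_lt arr hle
      obtain ⟨pL, wL⟩ := ih (lowA arr) (by omega)
      obtain ⟨pR, wR⟩ := ih (highA arr) (by omega)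
      obtain ⟨bL, bR⟩ := specParts_bounds arr h2
      rw [lowA_eq_spec arr h2] at pL wL hlow
      rw [highA_eq_spec arr h2] at pR wR hhigh
      rw [median_rec arr hle]
      rw [lowA_eq_spec arr h2, highA_eq_spec arr h2]
      dsimp only
      rw [List.append_assoc, List.singleton_append]
      constructor
      · exact ((pL.append (pR.cons _)).trans (specParts_perm arr h2))
      · rw [List.pairwise_append]
        refine ⟨wL, ?_, ?_⟩
        · rw [List.pairwise_cons]
          exact ⟨fun y hy => bR y (pR.mem_iff.mp hy), wR⟩
        · intro a ha b hb
          have haL : a < pivotA arr := bL a (pL.mem_iff.mp ha)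
          rcases List.mem_cons.mp hb with hb | hb
          · omega
          · have := bR b (pR.mem_iff.mp hb); omega

theorem resultA_perm_sorted (arr : List Int) :
    (median_of_three_pivot arr).2.Perm arr ∧
      (median_of_three_pivot arr).2.Pairwise (· ≤ ·) :=
  resultA_perm_sorted_fuel arr.length arr le_rfl

-- A's comparison count satisfies the segment recurrence B uses
theorem cntA_rec (seg : List Int) (h2 : ¬ PySem.List.len seg ≤ 1) :
    (median_of_three_pivot seg).1
      = (PySem.List.len seg - 1) + (median_of_three_pivot (stepB seg).1).1
          + (median_of_three_pivot (stepB seg).2).1 := by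
  have hl : ¬ seg.length ≤ 1 := by simp only [PySem.List.len_eq] at h2; omega
  rw [stepB_eq, median_rec seg hl]

-- the worklist accumulates exactly A's recursive count (fuel covers the iteration measure)
theorem workGo_sum : ∀ (fuel : Nat) (stack : List (List Int)) (total : Int),
    2 * (stack.map List.length).sum + stack.length ≤ fuel →
    workGo fuel stack total = total + (stack.map (fun seg => (median_of_three_pivot seg).1)).sum := by
  intro fuel
  induction fuel with
  | zero =>
    intro stack total h
    have hnil : stack = [] := by
      cases stack with
      | nil => rfl
      | cons a l => simp only [List.length_cons] at h; omega
    subst hnil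
    simp [workGo]
  | succ n ih =>
    intro stack total h
    cases stack with
    | nil => simp [workGo]
    | cons seg rest =>
      simp only [workGo]
      split_ifs with hs
      · rw [ih rest total (by simp only [List.map_cons, List.sum_cons, List.length_cons] at h; omega)]
        have hz : (median_of_three_pivot seg).1 = 0 := by
          rw [median_base seg (by simp only [PySem.List.len_eq] at hs; omega)]
        simp [hz]
      · have hlen := stepB_length seg (by simp only [PySem.List.len_eq] at hs; omega)
        rw [ih _ _ (by
          simp only [List.map_cons, List.sum_cons, List.length_cons] at h ⊢
          omega)]
        simp only [List.map_cons, List.sum_cons]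
        rw [cntA_rec seg hs]
        ring

-- ===== VERDICT (by name: the statement is the Claim_ definition above) =====
theorem median_of_three_pivot_spec : Claim_equal_median_of_three_pivot := by
  unfold Claim_equal_median_of_three_pivot Spec_median_of_three_pivot
  intro arr _
  unfold median_of_three_pivot_alt
  split_ifs with hle
  · rw [median_base arr (by simp only [PySem.List.len_eq] at hle; omega)]
  · obtain ⟨hperm, hpw⟩ := resultA_perm_sorted arr
    have hsorted := PySem.List.sorted_id_eq_of_perm_of_pairwise _ _ hperm hpw
    have hcnt := workGo_sum (2 * arr.length + 1) [arr] 0 (by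
      simp only [List.map_cons, List.map_nil, List.sum_cons, List.sum_nil, List.length_cons,
        List.length_nil]
      omega)
    simp only [List.map_cons, List.map_nil, List.sum_cons, List.sum_nil, add_zero, zero_add] at hcnt
    rw [hcnt, hsorted]
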